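-- pv_equiv track=rewrite | github.com/yunnie05/Introduction-to-Programming | Week 6/ip067.py | highest_items
-- ===== SOURCE A (Python) =====
-- def highest_items(menu):
--     high= list(menu.values())
--     high.sort()
--     high= int(high[-1])
--     lst=[]
--     for i in menu:
--         if menu[i]==high:
--             lst.append(i)
--     return lst
-- ===== SOURCE B (Python) =====
-- def highest_items(menu):
--     # One pass: track the running maximum value and the keys achieving it.
--     best = None
--     lst = []
--     for k, v in menu.items():
--         if best is None or v > best:
--             best = v
--             lst = [k]
--         elif v == best:
--             lst.append(k)
--     return lst
-- ===== Notes on version B (the rewrite author's own statement) =====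
-- stated objective: alternative
-- what changed: Replaces A's sort-all-values-then-rescan-with-dict-lookups by a single pass that tracks the running maximum value and the list of keys achieving it.
import Mathlib
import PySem

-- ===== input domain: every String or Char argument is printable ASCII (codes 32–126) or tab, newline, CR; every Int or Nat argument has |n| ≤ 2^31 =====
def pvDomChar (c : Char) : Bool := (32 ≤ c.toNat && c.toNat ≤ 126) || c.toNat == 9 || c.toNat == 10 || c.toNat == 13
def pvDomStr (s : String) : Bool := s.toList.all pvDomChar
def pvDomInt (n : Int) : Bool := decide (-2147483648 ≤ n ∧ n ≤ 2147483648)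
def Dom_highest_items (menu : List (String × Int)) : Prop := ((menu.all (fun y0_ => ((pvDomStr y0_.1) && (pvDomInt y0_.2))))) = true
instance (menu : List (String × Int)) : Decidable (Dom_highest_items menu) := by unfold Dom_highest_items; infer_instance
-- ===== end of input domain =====

-- B replaces A's sort-then-rescan by a single pass tracking the running maximum value and its keys
-- (alternative decomposition; B also returns [] where A raises IndexError on an empty menu).


-- ===== PORT A =====
-- high = sorted(list(menu.values())); high = int(high[-1]) (the values are ints, so int() is the
-- identity); then collect every key i with menu[i] == high.  high[-1] raises IndexError on an empty
-- menu (excluded by Pre_); the `.getD 0` default stands for that never-reached-inside-Pre_ case.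
def highest_items (menu : List (String × Int)) : List String :=
  let high0 := PySem.List.sorted (menu.map Prod.snd) (fun x => x) false
  let high : Int := (PySem.List.pyGet? high0 (-1)).getD 0
  menu.foldl (fun lst kv =>
    if ((PySem.Dict.mk menu).getD kv.1 0) == high then lst ++ [kv.1] else lst) []

-- ===== PORT B =====
-- one pass over menu.items(): running maximum `best` (None before the first item) and the keys `lst` achieving it
def highest_items_alt (menu : List (String × Int)) : List String :=
  (menu.foldl (fun (st : Option Int × List String) kv =>
      match st.1 with
      | none => (some kv.2, [kv.1])
      | some b =>
        if kv.2 > b then (some kv.2, [kv.1])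
        else if kv.2 == b then (some b, st.2 ++ [kv.1])
        else st) ((none : Option Int), ([] : List String))).2

-- ===== PRECONDITION & SPEC =====
-- Pre_ excludes the empty menu, on which A raises IndexError, and association lists with duplicate
-- keys, which cannot arise from a Python dict (a dict literal with a repeated key collapses it) and
-- whose assoc-list reading is ambiguous.
def Pre_highest_items (menu : List (String × Int)) : Prop :=
  menu ≠ [] ∧ (menu.map Prod.fst).Nodup
instance (menu : List (String × Int)) : Decidable (Pre_highest_items menu) := by
  unfold Pre_highest_items; infer_instance
def pvWitness_highest_items : (List (String × Int)) := [("soup", 2), ("cake", 3), ("tea", 3)]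

def Spec_highest_items (menu : List (String × Int)) (out : List String) : Prop := out = highest_items_alt menu
instance (menu : List (String × Int)) (out : List String) : Decidable (Spec_highest_items menu out) := by unfold Spec_highest_items; infer_instance

-- ===== CLAIM (what is proved, stated in full; the proofs are below) =====
def Claim_equal_highest_items : Prop := ∀ (menu : List (String × Int)), Dom_highest_items menu → Pre_highest_items menu → Spec_highest_items menu (highest_items menu)

-- ===== LEMMAS AND PROOFS =====

-- last element of a ≤-sorted list bounds every element
theorem pv_le_getLast? {s : List Int} {L : Int} (hp : s.Pairwise (· ≤ ·))
    (hL : s.getLast? = some L) : ∀ x ∈ s, x ≤ L := by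
  induction s with
  | nil => simp at hL
  | cons a t ih =>
    rcases List.pairwise_cons.mp hp with ⟨ha, hpt⟩
    cases t with
    | nil => simp_all
    | cons b u =>
      have hL' : (b :: u).getLast? = some L := by
        simpa [List.getLast?_cons_cons] using hL
      intro x hx
      rcases List.mem_cons.mp hx with rfl | hx
      · exact le_trans (ha b (by simp)) (ih hpt hL' b (by simp))
      · exact ih hpt hL' x hx

-- xs[-1] on a nonempty list is its last element
theorem pv_pyGet_neg_one {α : Type} (xs : List α) (h : xs ≠ []) :
    PySem.List.pyGet? xs (-1) = xs.getLast? := by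
  have hlen : 0 < xs.length := List.length_pos_iff.mpr h
  unfold PySem.List.pyGet? PySem.List.pyIdx?
  rw [if_neg (by omega), if_pos (by omega)]
  simp only [Option.bind]
  rw [List.getLast?_eq_getElem?]
  norm_num

-- the value A extracts as sorted(values)[-1] is the running maximum of the values
theorem pv_high_eq_max (k0 : String) (v0 : Int) (tl : List (String × Int)) :
    (PySem.List.pyGet? (PySem.List.sorted (((k0, v0) :: tl).map Prod.snd) (fun x => x) false) (-1)).getD 0
      = tl.foldl (fun a kv => max a kv.2) v0 := by
  set vs : List Int := ((k0, v0) :: tl).map Prod.snd with hvs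
  set s := PySem.List.sorted vs (fun x => x) false with hs
  have hsne : s ≠ [] := by
    rw [hs, Ne, PySem.List.sorted_eq_nil_iff]; simp [hvs]
  have hperm : s.Perm vs := PySem.List.sorted_perm vs (fun x => x) false
  obtain ⟨L, hL⟩ := List.getLast?_isSome.mpr hsne |> Option.isSome_iff_exists.mp
  rw [pv_pyGet_neg_one s hsne, hL]
  have hMfold : tl.foldl (fun a kv => max a kv.2) v0 = (tl.map Prod.snd).foldl max v0 := by
    rw [List.foldl_map]
  set M := tl.foldl (fun a kv => max a kv.2) v0 with hM
  have hMmem : M ∈ vs := by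
    rcases PySem.List.foldl_max_mem (tl.map Prod.snd) v0 with hc | hc
    · simp [hvs, hMfold, hc]
    · rw [hvs]; simp only [List.map_cons, List.mem_cons]; right; rw [hMfold]; exact hc
  have hub : ∀ y ∈ vs, y ≤ M := by
    intro y hy
    rw [hvs] at hy
    simp only [List.map_cons, List.mem_cons] at hy
    rw [hMfold]
    rcases hy with he | hy
    · rw [he]; exact (PySem.List.le_foldl_max (tl.map Prod.snd) v0).1
    · exact (PySem.List.le_foldl_max (tl.map Prod.snd) v0).2 y hy
  have hpw : s.Pairwise (· ≤ ·) := by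
    have := PySem.List.sorted_pairwise vs (fun x => x)
    simpa [hs] using this
  have hLub : ∀ x ∈ s, x ≤ L := pv_le_getLast? hpw hL
  have h1 : L ≤ M := hub L (hperm.mem_iff.mp (List.mem_of_getLast? hL))
  have h2 : M ≤ L := hLub M (hperm.mem_iff.mpr hMmem)
  simp [le_antisymm h1 h2]

-- with nodup keys the dict lookup of a member pair returns that pair's value
theorem pv_lookup_mem {menu : List (String × Int)} (hnd : (menu.map Prod.fst).Nodup)
    {kv : String × Int} (hm : kv ∈ menu) :
    (PySem.Dict.mk menu).getD kv.1 0 = kv.2 := by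
  have : List.find? (fun p => p.1 == kv.1) menu = some kv := by
    induction menu with
    | nil => simp at hm
    | cons a t ih =>
      simp only [List.map_cons, List.nodup_cons] at hnd
      rcases List.mem_cons.mp hm with rfl | hm'
      · simp [List.find?]
      · have hne : ¬ (a.1 == kv.1) = true := by
          simp only [beq_iff_eq]
          intro he
          exact hnd.1 (he ▸ List.mem_map_of_mem (f := Prod.fst) hm')
        simp [List.find?, hne, ih hnd.2 hm']
  simp [PySem.Dict.getD, PySem.Dict.get?, this]

-- characterisation of B's one-pass loop from a `some` state: the final best is the running maximum,
-- and the collected keys are those of the pairs carrying it (the accumulator survives only if no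
-- strictly larger value appears)
theorem pv_loopB (l : List (String × Int)) (m : Int) (acc : List String) :
    l.foldl (fun (st : Option Int × List String) kv =>
      match st.1 with
      | none => (some kv.2, [kv.1])
      | some b =>
        if kv.2 > b then (some kv.2, [kv.1])
        else if kv.2 == b then (some b, st.2 ++ [kv.1])
        else st) (some m, acc)
    = (some (l.foldl (fun a kv => max a kv.2) m),
       (if l.foldl (fun a kv => max a kv.2) m = m then acc else [])
         ++ (l.filter (fun kv => kv.2 == l.foldl (fun a kv => max a kv.2) m)).map Prod.fst) := by
  induction l generalizing m acc with
  | nil => simp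
  | cons hd t ih =>
    obtain ⟨k, v⟩ := hd
    have hub := PySem.List.le_foldl_max_int t (fun kv => kv.2) (max m v)
    simp only [List.foldl_cons]
    rcases lt_trichotomy m v with hlt | heq | hgt
    · -- v > m : reset
      have hmax : max m v = v := max_eq_right (le_of_lt hlt)
      rw [if_pos (show ((k, v).2 > m) from hlt), ih v [k]]
      simp only [hmax]
      have hMne : ¬ (t.foldl (fun a kv => max a kv.2) v = m) := by
        intro he; rw [hmax] at hub; have := hub.1; omega
      rw [if_neg hMne]
      by_cases hvM : v = t.foldl (fun a kv => max a kv.2) v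
      · simp [← hvM]
      · have hb : ¬ (((k, v).2 == t.foldl (fun a kv => max a kv.2) v) = true) := by
          simpa using hvM
        simp [hb, if_neg (fun h => hvM (Eq.symm h))]
    · -- v == m : append
      subst heq
      rw [if_neg (lt_irrefl _), if_pos (by simp), ih m (acc ++ [k])]
      simp only [max_self]
      by_cases hM : t.foldl (fun a kv => max a kv.2) m = m
      · simp [hM, List.append_assoc]
      · have hb : ¬ (((k, m).2 == t.foldl (fun a kv => max a kv.2) m) = true) := by
          simpa using fun h => hM (Eq.symm h)
        simp [hM, hb]
    · -- v < m : skip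
      have hmax : max m v = m := max_eq_left (le_of_lt hgt)
      rw [if_neg (by simpa using le_of_lt hgt : ¬ ((k, v).2 > m)),
          if_neg (by simpa using ne_of_lt hgt : ¬ (((k, v).2 == m) = true)), ih m acc]
      simp only [hmax]
      have hb : ¬ (((k, v).2 == t.foldl (fun a kv => max a kv.2) m) = true) := by
        rw [hmax] at hub
        simp only [beq_iff_eq]
        intro he; have := hub.1; omega
      simp [hb]

-- ===== VERDICT (by name: the statement is the Claim_ definition above) =====
theorem highest_items_spec : Claim_equal_highest_items := by
  intro menu _ hpre
  obtain ⟨hne, hnd⟩ := hpre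
  unfold Spec_highest_items
  cases menu with
  | nil => exact absurd rfl hne
  | cons kv0 tl =>
    obtain ⟨k0, v0⟩ := kv0
    set M := tl.foldl (fun a kv => max a kv.2) v0 with hM
    have hA : highest_items ((k0, v0) :: tl)
        = (((k0, v0) :: tl).filter (fun kv => kv.2 == M)).map Prod.fst := by
      unfold highest_items
      simp only []
      rw [pv_high_eq_max k0 v0 tl, ← hM]
      rw [PySem.List.foldl_congr_mem _ _
            (fun lst kv => if kv.2 == M then lst ++ [kv.1] else lst) _
            (fun acc kv hkv => by rw [pv_lookup_mem hnd hkv])]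
      rw [PySem.List.foldl_append_if (fun kv => kv.2 == M) Prod.fst]
      simp
    have hB : highest_items_alt ((k0, v0) :: tl)
        = (((k0, v0) :: tl).filter (fun kv => kv.2 == M)).map Prod.fst := by
      unfold highest_items_alt
      simp only [List.foldl_cons]
      rw [pv_loopB tl v0 [k0], ← hM]
      by_cases hv : v0 = M
      · simp [← hv]
      · have hb : ¬ ((((k0, v0) : String × Int).2 == M) = true) := by simpa using hv
        simp [hb, if_neg (fun h => hv (Eq.symm h))]
    rw [hA, hB]
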